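-- pv_equiv track=rewrite | github.com/HuJijin/Sketch_Recognition_Challenge | evaluation/main_evaluation.py | classid2label
-- ===== SOURCE A (Python) =====
-- def classid2label(pred_id):
--     pred_labels = []
--     id2labels = dict([(0,'airplane'),(1,'alarm_clock'),(2,'ambulance'),(3,'ant'),(4,'apple'),
--                         (5,'backpack'),(6,'basket'),(7,'butterfly'),(8,'cactus'),(9,'calculator'),
--                         (10,'campfire'),(11,'candle'),(12,'coffee_cup'),(13,'crab'),(14,'duck'),
--                         (15,'face'),(16,'ice_cream'),(17,'pig'),(18,'pineapple'),(19,'suitcase')])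
--     for i in range(len(pred_id)):
--         for key,value in id2labels.items():
--             if pred_id[i] == key:
--                 pred_labels.append(id2labels[key])
--     return pred_labels
-- ===== SOURCE B (Python) =====
-- LABELS = ['airplane', 'alarm_clock', 'ambulance', 'ant', 'apple',
--           'backpack', 'basket', 'butterfly', 'cactus', 'calculator',
--           'campfire', 'candle', 'coffee_cup', 'crab', 'duck',
--           'face', 'ice_cream', 'pig', 'pineapple', 'suitcase']
--
-- def classid2label(pred_id):
--     return [LABELS[x] for x in pred_id if 0 <= x < len(LABELS)]
-- ===== Notes on version B (the rewrite author's own statement) =====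
-- stated objective: idiomatic
-- what changed: Replaces the dict and the nested scan over dict.items() by a plain list of labels indexed by position: one comprehension pass with a range guard and direct list indexing, since the ids are exactly 0..19.
import Mathlib
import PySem

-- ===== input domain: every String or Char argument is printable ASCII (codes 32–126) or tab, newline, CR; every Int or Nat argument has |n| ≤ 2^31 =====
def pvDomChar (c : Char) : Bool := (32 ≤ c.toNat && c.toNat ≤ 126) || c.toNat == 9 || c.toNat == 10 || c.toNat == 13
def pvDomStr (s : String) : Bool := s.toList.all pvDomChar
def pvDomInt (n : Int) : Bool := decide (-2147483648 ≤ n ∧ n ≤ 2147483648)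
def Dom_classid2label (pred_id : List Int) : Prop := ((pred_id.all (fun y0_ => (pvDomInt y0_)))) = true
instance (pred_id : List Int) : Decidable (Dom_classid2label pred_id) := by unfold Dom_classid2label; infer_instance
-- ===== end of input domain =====

-- B drops the dict and the nested items() scan: the ids are exactly 0..19, so B keeps
-- a plain list of labels and does one pass with a range guard and direct indexing.

-- ===== PORT A =====
def pvId2Labels : PySem.Dict Int String :=
  PySem.Dict.ofList [(0,"airplane"),(1,"alarm_clock"),(2,"ambulance"),(3,"ant"),(4,"apple"),
    (5,"backpack"),(6,"basket"),(7,"butterfly"),(8,"cactus"),(9,"calculator"),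
    (10,"campfire"),(11,"candle"),(12,"coffee_cup"),(13,"crab"),(14,"duck"),
    (15,"face"),(16,"ice_cream"),(17,"pig"),(18,"pineapple"),(19,"suitcase")]

def classid2label (pred_id : List Int) : List String :=
  (PySem.List.pyRange 0 (PySem.List.len pred_id) 1).foldl
    (fun pred_labels i =>
      pvId2Labels.items.foldl
        (fun acc kv =>
          if PySem.List.pyGetD pred_id i 0 = kv.1 then
            acc ++ [pvId2Labels.getD kv.1 ""]
          else acc)
        pred_labels)
    []

-- ===== PORT B =====
def pvLabels : List String :=
  ["airplane", "alarm_clock", "ambulance", "ant", "apple",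
   "backpack", "basket", "butterfly", "cactus", "calculator",
   "campfire", "candle", "coffee_cup", "crab", "duck",
   "face", "ice_cream", "pig", "pineapple", "suitcase"]

def classid2label_alt (pred_id : List Int) : List String :=
  pred_id.filterMap (fun x =>
    if 0 ≤ x ∧ x < (PySem.List.len pvLabels : Int) then PySem.List.pyGet? pvLabels x else none)

-- ===== PRECONDITION & SPEC =====
def Spec_classid2label (pred_id : List Int) (out : List String) : Prop := out = classid2label_alt pred_id
instance (pred_id : List Int) (out : List String) : Decidable (Spec_classid2label pred_id out) := by unfold Spec_classid2label; infer_instance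

-- ===== CLAIM (what is proved, stated in full; the proofs are below) =====
def Claim_equal_classid2label : Prop := ∀ (pred_id : List Int), Dom_classid2label pred_id → Spec_classid2label pred_id (classid2label pred_id)

-- ===== LEMMAS AND PROOFS =====

-- the inner items-scan collects exactly the matching entries
lemma scan_aux (x : Int) (l : List (Int × String)) (acc : List String) :
    l.foldl (fun acc kv => if x = kv.1 then acc ++ [pvId2Labels.getD kv.1 ""] else acc) acc
    = acc ++ (l.filter (fun kv => decide (x = kv.1))).map (fun kv => pvId2Labels.getD kv.1 "") := by
  induction l generalizing acc with
  | nil => simp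
  | cons kv rest ih =>
    rw [List.foldl_cons, List.filter_cons]
    by_cases h : x = kv.1
    · rw [if_pos h, ih]
      simp [h]
    · rw [if_neg h, ih]
      simp [h]

-- in a dict with distinct keys, filtering the items for a key gives exactly the lookup
lemma filter_items_eq_get? (x : Int) :
    ∀ (l : List (Int × String)), (l.map Prod.fst).Nodup →
      (l.filter (fun kv => decide (x = kv.1))).map Prod.snd = ((PySem.Dict.mk l).get? x).toList := by
  intro l
  induction l with
  | nil => intro _; simp [PySem.Dict.get?]
  | cons kv rest ih =>
    intro hnd
    simp only [List.map_cons, List.nodup_cons] at hnd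
    rw [PySem.Dict.get?_mk_cons, List.filter_cons]
    by_cases h : x = kv.1
    · have hrest : rest.filter (fun kv' => decide (x = kv'.1)) = [] := by
        rw [List.filter_eq_nil_iff]
        intro p hp
        simp only [decide_eq_true_eq]
        intro hx
        have hkp : kv.1 = p.1 := by rw [← h, hx]
        apply hnd.1
        rw [hkp]
        exact List.mem_map_of_mem hp
      simp [← h, hrest]
    · have hbeq : (kv.1 == x) = false :=
        beq_eq_false_iff_ne.mpr (fun hh => h hh.symm)
      simp only [decide_eq_true_eq, h, if_false, hbeq]
      exact ih hnd.2

lemma mk_items : PySem.Dict.mk pvId2Labels.items = pvId2Labels := by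
  apply PySem.Dict.ext
  rfl

lemma keys_nodup : pvId2Labels.keys.Nodup := by
  have h : pvId2Labels.keys = [0,1,2,3,4,5,6,7,8,9,10,11,12,13,14,15,16,17,18,19] := by rfl
  rw [h]
  decide

-- one element of the outer loop: scanning all items for matches of x yields exactly the lookup
lemma inner_scan (x : Int) (acc : List String) :
    pvId2Labels.items.foldl
      (fun acc kv => if x = kv.1 then acc ++ [pvId2Labels.getD kv.1 ""] else acc) acc
    = acc ++ (pvId2Labels.get? x).toList := by
  rw [scan_aux]
  have hmap : (pvId2Labels.items.filter (fun kv => decide (x = kv.1))).map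
      (fun kv => pvId2Labels.getD kv.1 "")
      = (pvId2Labels.items.filter (fun kv => decide (x = kv.1))).map Prod.snd := by
    apply List.map_congr_left
    intro kv hkv
    obtain ⟨k, v⟩ := kv
    exact PySem.Dict.getD_of_mem_items _ (List.mem_of_mem_filter hkv) keys_nodup ""
  rw [hmap, filter_items_eq_get? x pvId2Labels.items keys_nodup, mk_items]

-- the dict lookup agrees with B's guarded positional indexing
set_option maxHeartbeats 1000000 in
lemma lookup_eq (x : Int) :
    pvId2Labels.get? x
    = (if 0 ≤ x ∧ x < (PySem.List.len pvLabels : Int) then PySem.List.pyGet? pvLabels x else none) := by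
  rw [show (PySem.List.len pvLabels : Int) = 20 from by decide]
  by_cases h : 0 ≤ x ∧ x < 20
  · rw [if_pos h]
    obtain ⟨h0, h20⟩ := h
    interval_cases x <;> decide
  · rw [if_neg h]
    apply (PySem.Dict.get?_eq_none_iff_not_mem_keys pvId2Labels x).mpr
    rw [show pvId2Labels.keys = [0,1,2,3,4,5,6,7,8,9,10,11,12,13,14,15,16,17,18,19] from rfl]
    intro hm
    simp only [List.mem_cons, List.not_mem_nil, or_false] at hm
    omega

-- the outer loop over list elements builds the filterMap
lemma outer_loop (xs : List Int) (acc : List String) :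
    xs.foldl
      (fun pred_labels x =>
        pvId2Labels.items.foldl
          (fun acc kv => if x = kv.1 then acc ++ [pvId2Labels.getD kv.1 ""] else acc)
          pred_labels)
      acc
    = acc ++ xs.filterMap (fun x => pvId2Labels.get? x) := by
  induction xs generalizing acc with
  | nil => simp
  | cons x rest ih =>
    rw [List.foldl_cons, inner_scan, ih, List.filterMap_cons]
    cases pvId2Labels.get? x <;> simp

-- ===== VERDICT (by name: the statement is the Claim_ definition above) =====
theorem classid2label_spec : Claim_equal_classid2label := by
  intro pred_id _
  unfold Spec_classid2label classid2label classid2label_alt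
  rw [PySem.List.foldl_pyRange_zero_pyGetD pred_id (0 : Int)
    (fun pred_labels x =>
      pvId2Labels.items.foldl
        (fun acc kv => if x = kv.1 then acc ++ [pvId2Labels.getD kv.1 ""] else acc)
        pred_labels) []]
  rw [outer_loop pred_id []]
  apply List.filterMap_congr
  intro x _
  exact lookup_eq x
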